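-- pv_equiv track=rewrite | github.com/aa403/betfair.py | bot_methods/data_tools.py | clean_all_combinations
-- ===== SOURCE A (Python) =====
-- def clean_all_combinations(my_list):
--     """
--     Hit this function first. It cleans the list of combinations that return from the all_combinations
--     function to get rid of duplicates and single-element combinations (e.g. [1] is removed).
--
--     INPUT: [list]
--     RETURN: [list of [list]]
--     """
--     list_to_clean = all_combinations( my_list )
--     clean_list = []
--     clean_list.append( my_list )
--     for element in list_to_clean:
--         if element not in clean_list and len(element) > 0:
--             clean_list.append( element )
--     return clean_list
--
-- def all_combinations(my_list):
--     """
--     Passed a list, this function will return a list of lists of every combination of every element from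
--     the original list. NOTE: It does this using recursion.
--
--     INPUT: [list]
--     RETURN: [list of [list]]
--     """
--     return_lists = []
--     for element in my_list:
--         list_to_add = []
--         for a_different_element in my_list:
--             if a_different_element != element:
--                 list_to_add.append(a_different_element)
--         return_lists.append( list_to_add )
--         if len(list_to_add) < 2:
--             pass
--         else:
--             return_lists.extend(all_combinations( list_to_add ))
--     return return_lists
-- ===== SOURCE B (Python) =====
-- def clean_all_combinations(my_list):
--     """
--     Fused generation + cleaning: one depth-first recursion that emits each
--     non-empty reduced list the first time it is produced and prunes the
--     traversal at already-seen lists (their whole subtree was already emitted),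
--     instead of materialising every combination and filtering afterwards.
--
--     INPUT: [list]
--     RETURN: [list of [list]]
--     """
--     out = [my_list]
--     seen = {tuple(my_list)}
--
--     def go(lst):
--         for value in lst:
--             reduced = [x for x in lst if x != value]
--             key = tuple(reduced)
--             if reduced and key not in seen:
--                 seen.add(key)
--                 out.append(reduced)
--                 if len(reduced) >= 2:
--                     go(reduced)
--
--     go(my_list)
--     return out
-- ===== Notes on version B (the rewrite author's own statement) =====
-- stated objective: alternative
-- what changed: B fuses generation and cleaning into a single seen-set-pruned depth-first recursion that emits each non-empty reduced list on first encounter and never re-expands an already-seen sublist, instead of materialising every combination recursively and then filtering duplicates and empties in a second pass; intended as faster (a timing run saw A time out at n=16 where B returned, but could not certify a ratio), so no unqualified speed claim is made.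
import Mathlib
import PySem

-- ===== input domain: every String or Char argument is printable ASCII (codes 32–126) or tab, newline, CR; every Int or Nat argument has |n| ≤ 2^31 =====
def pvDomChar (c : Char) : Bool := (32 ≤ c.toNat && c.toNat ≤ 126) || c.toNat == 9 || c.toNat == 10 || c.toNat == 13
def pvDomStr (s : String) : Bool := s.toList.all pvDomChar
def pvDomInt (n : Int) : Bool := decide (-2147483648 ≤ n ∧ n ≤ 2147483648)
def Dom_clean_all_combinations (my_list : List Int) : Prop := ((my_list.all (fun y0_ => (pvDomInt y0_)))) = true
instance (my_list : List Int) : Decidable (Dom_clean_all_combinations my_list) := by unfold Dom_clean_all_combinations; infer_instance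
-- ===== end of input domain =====

-- B fuses generation and cleaning into one seen-set-pruned depth-first recursion instead of
-- materialising every combination and filtering afterwards (A re-expands every duplicate
-- sublist, B expands each distinct sublist once).

-- termination helper for both ports: removing a present value shortens the list
theorem pvFilterNeLt {a : Int} {L : List Int} (h : a ∈ L) :
    (L.filter (fun x => decide (x ≠ a))).length < L.length := by
  induction L with
  | nil => cases h
  | cons b t ih =>
    by_cases hba : b = a
    · subst hba
      simpa [List.filter] using Nat.lt_succ_of_le (List.length_filter_le _ t)
    · have ha : a ∈ t := by cases h with
        | head => exact absurd rfl hba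
        | tail _ h' => exact h'
      have := ih ha
      simp [List.filter, hba]
      omega

-- ===== PORT A =====
mutual
-- the 'for element in my_list' loop of all_combinations, with its accumulator return_lists
def allCombGo (L : List Int) (rest : List {x // x ∈ L}) (acc : List (List Int)) :
    List (List Int) :=
  match rest with
  | [] => acc
  | e :: rs =>
    let c := L.filter (fun x => decide (x ≠ e.1))
    allCombGo L rs ((acc ++ [c]) ++ (if c.length < 2 then [] else allComb c))
  termination_by (L.length, 0, rest.length)
  decreasing_by
    · exact Prod.Lex.left _ _ (pvFilterNeLt e.2)
    · exact Prod.Lex.right _ (Prod.Lex.right _ (Nat.lt_succ_self _))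

def allComb (L : List Int) : List (List Int) := allCombGo L L.attach []
  termination_by (L.length, 1, 0)
  decreasing_by exact Prod.Lex.right _ (Prod.Lex.left _ _ (Nat.lt_succ_self 0))
end

-- the cleaning loop body of clean_all_combinations
def cleanStep (cl : List (List Int)) (e : List Int) : List (List Int) :=
  if e ∉ cl ∧ 0 < e.length then cl ++ [e] else cl

def clean_all_combinations (my_list : List Int) : List (List Int) :=
  (allComb my_list).foldl cleanStep [my_list]

-- ===== PORT B =====
mutual
-- the 'for value in lst' loop of go; state = (out, seen)
def cacGoB (L : List Int) (rest : List {x // x ∈ L})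
    (st : List (List Int) × PySem.Set (List Int)) :
    List (List Int) × PySem.Set (List Int) :=
  match rest with
  | [] => st
  | v :: rs =>
    let c := L.filter (fun x => decide (x ≠ v.1))
    let st' :=
      if c ≠ [] ∧ ¬ PySem.Set.contains st.2 c then
        let out' := st.1 ++ [c]
        let seen' := PySem.Set.add st.2 c
        if 2 ≤ c.length then cacExpandB c (out', seen') else (out', seen')
      else st
    cacGoB L rs st'
  termination_by (L.length, 0, rest.length)
  decreasing_by
    · exact Prod.Lex.left _ _ (pvFilterNeLt v.2)
    · exact Prod.Lex.right _ (Prod.Lex.right _ (Nat.lt_succ_self _))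

def cacExpandB (L : List Int) (st : List (List Int) × PySem.Set (List Int)) :
    List (List Int) × PySem.Set (List Int) :=
  cacGoB L L.attach st
  termination_by (L.length, 1, 0)
  decreasing_by exact Prod.Lex.right _ (Prod.Lex.left _ _ (Nat.lt_succ_self 0))
end

def clean_all_combinations_alt (my_list : List Int) : List (List Int) :=
  (cacExpandB my_list ([my_list], PySem.Set.ofList [my_list])).1

-- ===== PRECONDITION & SPEC =====
def Spec_clean_all_combinations (my_list : List Int) (out : List (List Int)) : Prop := out = clean_all_combinations_alt my_list
instance (my_list : List Int) (out : List (List Int)) : Decidable (Spec_clean_all_combinations my_list out) := by unfold Spec_clean_all_combinations; infer_instance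

-- ===== CLAIM (what is proved, stated in full; the proofs are below) =====
def Claim_equal_clean_all_combinations : Prop := ∀ (my_list : List Int), Dom_clean_all_combinations my_list → Spec_clean_all_combinations my_list (clean_all_combinations my_list)

-- ===== LEMMAS AND PROOFS =====

-- unfolding equations of the four wf-recursive functions
theorem allCombGo_nil (L : List Int) (acc : List (List Int)) : allCombGo L [] acc = acc := by
  rw [allCombGo.eq_def]

theorem allCombGo_cons (L : List Int) (e : {x // x ∈ L}) (rs : List {x // x ∈ L})
    (acc : List (List Int)) :
    allCombGo L (e :: rs) acc =
      allCombGo L rs ((acc ++ [L.filter (fun x => decide (x ≠ e.1))]) ++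
        (if (L.filter (fun x => decide (x ≠ e.1))).length < 2 then []
         else allComb (L.filter (fun x => decide (x ≠ e.1))))) := by
  rw [allCombGo.eq_def]

theorem cacGoB_nil (L : List Int) (st : List (List Int) × PySem.Set (List Int)) :
    cacGoB L [] st = st := by
  rw [cacGoB.eq_def]

theorem cacGoB_cons (L : List Int) (v : {x // x ∈ L}) (rs : List {x // x ∈ L})
    (st : List (List Int) × PySem.Set (List Int)) :
    cacGoB L (v :: rs) st =
      cacGoB L rs
        (if (L.filter (fun x => decide (x ≠ v.1))) ≠ [] ∧
            ¬ PySem.Set.contains st.2 (L.filter (fun x => decide (x ≠ v.1))) then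
          (if 2 ≤ (L.filter (fun x => decide (x ≠ v.1))).length then
            cacExpandB (L.filter (fun x => decide (x ≠ v.1)))
              (st.1 ++ [L.filter (fun x => decide (x ≠ v.1))],
               PySem.Set.add st.2 (L.filter (fun x => decide (x ≠ v.1))))
          else (st.1 ++ [L.filter (fun x => decide (x ≠ v.1))],
                PySem.Set.add st.2 (L.filter (fun x => decide (x ≠ v.1)))))
         else st) := by
  rw [cacGoB.eq_def]

theorem cacExpandB_eq (L : List Int) (st : List (List Int) × PySem.Set (List Int)) :
    cacExpandB L st = cacGoB L L.attach st := by
  rw [cacExpandB]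

-- d has been fully expanded into out
def Expanded (d : List Int) (out : List (List Int)) : Prop :=
  ∀ x ∈ allComb d, x ≠ [] → x ∈ out

-- every member of out shorter than k has been fully expanded into out
def ClosedBelow (k : Nat) (out : List (List Int)) : Prop :=
  ∀ d ∈ out, d.length < k → Expanded d out

-- the seen set tracks exactly the members of out
def SeenInv (seen : PySem.Set (List Int)) (out : List (List Int)) : Prop :=
  ∀ x, x ∈ seen ↔ x ∈ out

theorem expanded_mono {d : List Int} {out out' : List (List Int)}
    (hsub : ∀ x, x ∈ out → x ∈ out') (h : Expanded d out) : Expanded d out' :=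
  fun x hx hne => hsub x (h x hx hne)

theorem mem_foldl_cleanStep {x : List Int} :
    ∀ (s : List (List Int)) (out : List (List Int)), x ∈ out → x ∈ s.foldl cleanStep out := by
  intro s
  induction s with
  | nil => intro out h; exact h
  | cons e t ih =>
    intro out h
    rw [List.foldl_cons]
    apply ih
    unfold cleanStep
    split
    · exact List.mem_append_left _ h
    · exact h

theorem mem_of_mem_foldl_cleanStep {x : List Int} :
    ∀ (s : List (List Int)) (out : List (List Int)), x ∈ s → x ≠ [] → x ∈ s.foldl cleanStep out := by
  intro s
  induction s with
  | nil => intro out h; cases h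
  | cons e t ih =>
    intro out h hne
    rw [List.foldl_cons]
    cases h with
    | head =>
      apply mem_foldl_cleanStep
      unfold cleanStep
      split
      · exact List.mem_append_right _ (List.mem_singleton.mpr rfl)
      · rename_i hcond
        rcases not_and_or.mp hcond with h1 | h2
        · exact not_not.mp h1
        · exact absurd (List.length_pos_iff.mpr hne) h2
    | tail _ h' => exact ih _ h' hne

theorem foldl_cleanStep_noop :
    ∀ (s : List (List Int)) (out : List (List Int)),
      (∀ x ∈ s, x ≠ [] → x ∈ out) → s.foldl cleanStep out = out := by
  intro s
  induction s with
  | nil => intro out _; rfl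
  | cons e t ih =>
    intro out h
    have he : cleanStep out e = out := by
      unfold cleanStep
      by_cases hne : e = []
      · subst hne; simp
      · simp [h e List.mem_cons_self hne]
    rw [List.foldl_cons, he]
    exact ih out (fun x hx => h x (List.mem_cons_of_mem _ hx))

-- the accumulator of allCombGo is a prefix
theorem allCombGo_acc (L : List Int) :
    ∀ (rest : List {x // x ∈ L}) (acc : List (List Int)),
      allCombGo L rest acc = acc ++ allCombGo L rest [] := by
  intro rest
  induction rest with
  | nil => intro acc; rw [allCombGo_nil, allCombGo_nil]; simp
  | cons e rs ih =>
    intro acc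
    rw [allCombGo_cons, allCombGo_cons]
    rw [ih, ih ((([] : List (List Int)) ++ _) ++ _)]
    simp

theorem allComb_small {d : List Int} (h : d.length ≤ 1) :
    ∀ x ∈ allComb d, x = [] := by
  match d with
  | [] =>
    intro x hx
    rw [allComb] at hx
    simp only [List.attach_nil] at hx
    rw [allCombGo_nil] at hx
    cases hx
  | [a] =>
    intro x hx
    rw [allComb] at hx
    have hatt : ([a].attach : List {x // x ∈ [a]}) = [⟨a, List.mem_singleton.mpr rfl⟩] := by
      simp [List.attach, List.attachWith]
    rw [hatt, allCombGo_cons, allCombGo_nil] at hx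
    simp [List.filter] at hx
    exact hx
  | a :: b :: t => simp at h

-- the grand invariant: B's pruned DFS over 'rest' equals A's clean-fold over the
-- corresponding flattened segment, extends out by shorter lists only, and preserves
-- SeenInv and ClosedBelow
theorem pvGL :
    ∀ (n : Nat) (L : List Int), L.length ≤ n →
    ∀ (rest : List {x // x ∈ L}) (out : List (List Int)) (seen : PySem.Set (List Int)),
      SeenInv seen out → ClosedBelow L.length out →
      (cacGoB L rest (out, seen)).1 = (allCombGo L rest []).foldl cleanStep out
      ∧ SeenInv (cacGoB L rest (out, seen)).2 (cacGoB L rest (out, seen)).1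
      ∧ (∃ suf, (cacGoB L rest (out, seen)).1 = out ++ suf ∧ ∀ x ∈ suf, x.length < L.length)
      ∧ ClosedBelow L.length (cacGoB L rest (out, seen)).1 := by
  intro n
  induction n with
  | zero =>
    intro L hL rest out seen hseen hclosed
    match rest with
    | [] =>
      rw [cacGoB_nil, allCombGo_nil]
      exact ⟨rfl, hseen, ⟨[], by simp, by simp⟩, hclosed⟩
    | v :: rs =>
      exact absurd v.2 (by simp [List.length_eq_zero_iff.mp (Nat.le_zero.mp hL)])
  | succ n ihn =>
    intro L hL rest
    induction rest with
    | nil =>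
      intro out seen hseen hclosed
      rw [cacGoB_nil, allCombGo_nil]
      exact ⟨rfl, hseen, ⟨[], by simp, by simp⟩, hclosed⟩
    | cons v rs ihr =>
      intro out seen hseen hclosed
      have hcl : (L.filter (fun x => decide (x ≠ v.1))).length < L.length := pvFilterNeLt v.2
      rw [cacGoB_cons, allCombGo_cons, allCombGo_acc L rs, List.foldl_append]
      set c := L.filter (fun x => decide (x ≠ v.1)) with hc
      by_cases hcond : c ≠ [] ∧ ¬ PySem.Set.contains seen c
      · -- emit c (and possibly expand it)
        have hcnotin : c ∉ out := fun h =>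
          hcond.2 ((PySem.Set.contains_iff _ _).mpr ((hseen c).mpr h))
        have hstep : cleanStep out c = out ++ [c] := by
          unfold cleanStep
          simp [hcnotin, List.length_pos_iff.mpr hcond.1]
        have hseen' : SeenInv (PySem.Set.add seen c) (out ++ [c]) := by
          intro x
          rw [PySem.Set.mem_add]
          constructor
          · rintro (h | rfl)
            · exact List.mem_append_left _ ((hseen x).mp h)
            · exact List.mem_append_right _ (List.mem_singleton.mpr rfl)
          · intro h
            rcases List.mem_append.mp h with h | h
            · exact Or.inl ((hseen x).mpr h)
            · exact Or.inr (List.mem_singleton.mp h)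
        rw [if_pos hcond]
        by_cases hlen : 2 ≤ c.length
        · -- expand the fresh c via the outer induction hypothesis
          rw [if_pos hlen]
          have hcn : c.length ≤ n := by omega
          have hclosed' : ClosedBelow c.length (out ++ [c]) := by
            intro d hd hdlt
            rcases List.mem_append.mp hd with hd | hd
            · exact expanded_mono (fun x h => List.mem_append_left _ h)
                (hclosed d hd (by omega))
            · rw [List.mem_singleton.mp hd] at hdlt; omega
          obtain ⟨hEq, hSeen, ⟨suf, hSuf, hSufLen⟩, hClosed⟩ :=
            ihn c hcn c.attach (out ++ [c]) (PySem.Set.add seen c) hseen' hclosed'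
          rw [← cacExpandB_eq] at hEq hSeen hSuf hClosed
          -- the state after processing v, as a literal pair
          have hpair : cacExpandB c (out ++ [c], PySem.Set.add seen c)
              = ((out ++ [c]) ++ suf, (cacExpandB c (out ++ [c], PySem.Set.add seen c)).2) :=
            Prod.ext hSuf rfl
          have hAseg : ((([] : List (List Int)) ++ [c]) ++
              (if c.length < 2 then [] else allComb c)).foldl cleanStep out
              = (out ++ [c]) ++ suf := by
            rw [if_neg (by omega)]
            simp only [List.nil_append, List.foldl_append, List.foldl_cons, List.foldl_nil]
            rw [hstep, ← hSuf, hEq, allComb]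
          have hclosedL : ClosedBelow L.length ((out ++ [c]) ++ suf) := by
            intro d hd hdlt
            rcases List.mem_append.mp hd with hd' | hd'
            · rcases List.mem_append.mp hd' with hd'' | hd''
              · exact expanded_mono
                  (fun x h => List.mem_append_left _ (List.mem_append_left _ h))
                  (hclosed d hd'' hdlt)
              · -- d = c : freshly fully expanded
                rw [List.mem_singleton.mp hd'']
                intro x hx hne
                rw [← hSuf, hEq]
                rw [allComb] at hx
                exact mem_of_mem_foldl_cleanStep _ _ hx hne
            · -- d ∈ suf, shorter than c
              have := hClosed d (by rw [hSuf]; exact List.mem_append_right _ hd')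
                (hSufLen d hd')
              rw [hSuf] at this
              exact this
          obtain ⟨hEq2, hSeen2, ⟨suf2, hSuf2, hSufLen2⟩, hClosed2⟩ :=
            ihr ((out ++ [c]) ++ suf) (cacExpandB c (out ++ [c], PySem.Set.add seen c)).2
              (by rw [← hSuf]; exact hSeen) hclosedL
          rw [hpair]
          refine ⟨?_, hSeen2, ⟨[c] ++ suf ++ suf2, by rw [hSuf2]; simp, ?_⟩, hClosed2⟩
          · rw [hEq2, hAseg]
          · intro x hx
            simp only [List.mem_append, List.mem_singleton] at hx
            rcases hx with (rfl | hx) | hx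
            · exact hcl
            · exact lt_trans (hSufLen x hx) hcl
            · exact hSufLen2 x hx
        · -- |c| ≤ 1: emit only
          rw [if_neg hlen]
          have hclosed'' : ClosedBelow L.length (out ++ [c]) := by
            intro d hd hdlt
            rcases List.mem_append.mp hd with hd | hd
            · exact expanded_mono (fun x h => List.mem_append_left _ h) (hclosed d hd hdlt)
            · rw [List.mem_singleton.mp hd]
              intro x hx hne
              exact absurd (allComb_small (by omega) x hx) hne
          obtain ⟨hEq2, hSeen2, ⟨suf2, hSuf2, hSufLen2⟩, hClosed2⟩ :=
            ihr (out ++ [c]) (PySem.Set.add seen c) hseen' hclosed''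
          refine ⟨?_, hSeen2, ⟨[c] ++ suf2, by rw [hSuf2]; simp, ?_⟩, hClosed2⟩
          · rw [hEq2, if_pos (by omega)]
            simp only [List.nil_append, List.foldl_append, List.foldl_cons, List.foldl_nil,
              hstep]
          · intro x hx
            rcases List.mem_append.mp hx with hx | hx
            · rw [List.mem_singleton.mp hx]; exact hcl
            · exact hSufLen2 x hx
      · -- skip: c is empty or already seen
        have hsk : c = [] ∨ c ∈ out := by
          rcases not_and_or.mp hcond with h | h
          · exact Or.inl (not_not.mp h)
          · exact Or.inr ((hseen c).mp ((PySem.Set.contains_iff _ _).mp (not_not.mp h)))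
        have hstep : cleanStep out c = out := by
          unfold cleanStep
          rcases hsk with h0 | hin
          · simp [h0]
          · simp [hin]
        have hAseg : ((([] : List (List Int)) ++ [c]) ++
            (if c.length < 2 then [] else allComb c)).foldl cleanStep out = out := by
          simp only [List.nil_append, List.foldl_append, List.foldl_cons, List.foldl_nil, hstep]
          by_cases h2 : c.length < 2
          · rw [if_pos h2]; rfl
          · rw [if_neg h2]
            have hcin : c ∈ out := by
              rcases hsk with h0 | hin
              · rw [h0] at h2; simp at h2
              · exact hin
            exact foldl_cleanStep_noop _ _ (hclosed c hcin hcl)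
        rw [if_neg hcond, hAseg]
        exact ihr out seen hseen hclosed

-- ===== VERDICT (by name: the statement is the Claim_ definition above) =====
theorem clean_all_combinations_spec : Claim_equal_clean_all_combinations := by
  intro L _
  unfold Spec_clean_all_combinations clean_all_combinations clean_all_combinations_alt
  rw [cacExpandB_eq]
  have hseen : SeenInv (PySem.Set.ofList [L]) [L] := by
    intro x
    rw [PySem.Set.mem_ofList]
  have hclosed : ClosedBelow L.length [L] := by
    intro d hd hdlt
    rw [List.mem_singleton.mp hd] at hdlt
    omega
  obtain ⟨hEq, _, _, _⟩ := pvGL L.length L le_rfl L.attach [L] (PySem.Set.ofList [L]) hseen hclosed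
  rw [hEq, allComb]
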